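-- pv_equiv track=rewrite | github.com/hiroki-tomioka/PatchDecomp | src/analyzer.py | extract_important_patches
-- ===== SOURCE A (Python) =====
-- def extract_important_patches(patch_importance, k):
--     # Sort patches based on patch importance
--     sorted_patch_importance = sorted(
--         patch_importance.items(), key=lambda x: x[1], reverse=True
--     )
--     # Extract the top k% patches
--     removed_patches_num = int(len(sorted_patch_importance) * k // 100)
--     removed_patches = sorted_patch_importance[:removed_patches_num]
--     removed_patches = [key for key, _ in removed_patches]
--     return removed_patches
-- ===== SOURCE B (Python) =====
-- import heapq
--
-- def extract_important_patches(patch_importance, k):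
--     removed_patches_num = int(len(patch_importance) * k // 100)
--     return [key for key, _ in heapq.nlargest(
--         removed_patches_num, patch_importance.items(), key=lambda x: x[1])]
-- ===== Notes on version B (the rewrite author's own statement) =====
-- stated objective: alternative
-- what changed: Replaces full reverse-sort plus slice with heapq.nlargest heap-based partial top-k selection (documented to equal sorted(...,reverse=True)[:n], same stable tie-breaking).
-- intended difference: For negative k (a nonsensical negative percentage) where the computed count is negative but exceeds -len, A's slice [:negative] accidentally returns all but the last |count| keys, while B's nlargest returns [], the intended empty selection for a non-positive percentage. — e.g. on extract_important_patches([(1, 5), (2, 3)], -50): A returns [1], B returns []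
import Mathlib
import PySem

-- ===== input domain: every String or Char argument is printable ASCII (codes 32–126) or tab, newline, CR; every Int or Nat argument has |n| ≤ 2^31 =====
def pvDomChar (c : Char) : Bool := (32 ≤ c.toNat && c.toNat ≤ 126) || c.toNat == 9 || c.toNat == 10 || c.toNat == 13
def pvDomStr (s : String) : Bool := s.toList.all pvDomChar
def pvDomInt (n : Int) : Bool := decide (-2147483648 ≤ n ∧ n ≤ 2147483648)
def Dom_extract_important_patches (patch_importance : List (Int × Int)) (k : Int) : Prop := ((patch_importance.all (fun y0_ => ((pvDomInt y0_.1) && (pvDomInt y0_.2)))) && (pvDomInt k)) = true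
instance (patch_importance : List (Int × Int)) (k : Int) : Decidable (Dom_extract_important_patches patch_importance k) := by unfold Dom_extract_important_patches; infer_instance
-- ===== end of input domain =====

-- B replaces the full reverse-sort-and-slice with heapq.nlargest partial top-k selection
-- (same stable ordering; for a negative k B naturally selects nothing, see D_ below).

-- ===== PORT A =====
def extract_important_patches (patch_importance : List (Int × Int)) (k : Int) : List Int :=
  let sorted_patch_importance :=
    PySem.List.sorted (PySem.Dict.ofList patch_importance).items (fun x => x.2) true
  let removed_patches_num :=
    PySem.Int.floordiv ((sorted_patch_importance.length : Int) * k) 100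
  let removed_patches := PySem.List.slice sorted_patch_importance none (some removed_patches_num)
  removed_patches.map (fun p => p.1)

-- ===== PORT B =====
-- heapq.nlargest n xs (key) — ported by its contract: sorted(xs, key, reverse=True)[:n] for n > 0, [] for n ≤ 0
def pyNlargest (n : Int) (xs : List (Int × Int)) : List (Int × Int) :=
  if n ≤ 0 then [] else (PySem.List.sorted xs (fun x => x.2) true).take n.toNat

def extract_important_patches_alt (patch_importance : List (Int × Int)) (k : Int) : List Int :=
  let items := (PySem.Dict.ofList patch_importance).items
  let removed_patches_num := PySem.Int.floordiv ((items.length : Int) * k) 100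
  (pyNlargest removed_patches_num items).map (fun p => p.1)

-- ===== PRECONDITION & SPEC =====
-- For negative k where the computed count n = len*k//100 satisfies -len < n < 0, A's slice [:n]
-- accidentally returns all but the last |n| keys, while B returns [], the intended empty
-- selection for a non-positive percentage.
def D_extract_important_patches (patch_importance : List (Int × Int)) (k : Int) : Prop :=
  let len := ((PySem.Dict.ofList patch_importance).items.length : Int)
  PySem.Int.floordiv (len * k) 100 < 0 ∧ 0 < len + PySem.Int.floordiv (len * k) 100
instance (patch_importance : List (Int × Int)) (k : Int) : Decidable (D_extract_important_patches patch_importance k) := by unfold D_extract_important_patches; infer_instance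

def Spec_extract_important_patches (patch_importance : List (Int × Int)) (k : Int) (out : List Int) : Prop := ¬ D_extract_important_patches patch_importance k → out = extract_important_patches_alt patch_importance k
instance (patch_importance : List (Int × Int)) (k : Int) (out : List Int) : Decidable (Spec_extract_important_patches patch_importance k out) := by unfold Spec_extract_important_patches; infer_instance

def pvDiffWitness_extract_important_patches : (List (Int × Int)) × Int := ([(1, 5), (2, 3)], -50)
def pvDiffWitnessOut_extract_important_patches : (List Int) × (List Int) := ([1], [])

-- ===== CLAIM (what is proved, stated in full; the proofs are below) =====
def Claim_unchanged_extract_important_patches : Prop := ∀ (patch_importance : List (Int × Int)) (k : Int), Dom_extract_important_patches patch_importance k → Spec_extract_important_patches patch_importance k (extract_important_patches patch_importance k)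
def Claim_changed_extract_important_patches : Prop := Dom_extract_important_patches (pvDiffWitness_extract_important_patches.1) (pvDiffWitness_extract_important_patches.2) ∧ D_extract_important_patches (pvDiffWitness_extract_important_patches.1) (pvDiffWitness_extract_important_patches.2) ∧ extract_important_patches (pvDiffWitness_extract_important_patches.1) (pvDiffWitness_extract_important_patches.2) = pvDiffWitnessOut_extract_important_patches.1 ∧ extract_important_patches_alt (pvDiffWitness_extract_important_patches.1) (pvDiffWitness_extract_important_patches.2) = pvDiffWitnessOut_extract_important_patches.2 ∧ pvDiffWitnessOut_extract_important_patches.1 ≠ pvDiffWitnessOut_extract_important_patches.2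
def Claim_exact_extract_important_patches : Prop := ∀ (patch_importance : List (Int × Int)) (k : Int), Dom_extract_important_patches patch_importance k → D_extract_important_patches patch_importance k → extract_important_patches patch_importance k ≠ extract_important_patches_alt patch_importance k

-- ===== LEMMAS AND PROOFS =====

-- Outside D_: if n ≥ 0 both take n.toNat of the same sorted list; if n ≤ -len both are empty.
theorem slice_to_ne_nil {α : Type} (xs : List α) (n : Int) (h1 : n < 0)
    (h2 : 0 < (xs.length : Int) + n) : PySem.List.slice xs none (some n) ≠ [] := by
  have hb : PySem.List.clampIdx xs.length n = ((xs.length : Int) + n).toNat := by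
    simp only [PySem.List.clampIdx, if_pos h1]
    rw [if_neg (by omega)]
  intro hc
  have := congrArg List.length hc
  simp only [PySem.List.slice, hb, List.length_take, List.length_drop, List.length_nil] at this
  omega

theorem slice_to_empty {α : Type} (xs : List α) (n : Int)
    (h : (xs.length : Int) + n ≤ 0) : PySem.List.slice xs none (some n) = [] := by
  simp only [PySem.List.slice, PySem.List.clampIdx]
  split_ifs with h1 h2 <;> simp <;> omega

theorem extract_important_patches_spec : Claim_unchanged_extract_important_patches := by
  intro pi k _ hD
  unfold D_extract_important_patches at hD
  unfold extract_important_patches extract_important_patches_alt pyNlargest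
  simp only [PySem.List.length_sorted]
  set items := (PySem.Dict.ofList pi).items with hi
  set n := PySem.Int.floordiv ((items.length : Int) * k) 100 with hn
  simp only [not_and, not_lt] at hD
  by_cases hneg : n < 0
  · have hlen : (items.length : Int) + n ≤ 0 := by
      have := hD hneg; omega
    rw [if_pos (le_of_lt hneg),
        slice_to_empty _ _ (by rw [PySem.List.length_sorted]; exact hlen)]
  · by_cases h0 : n = 0
    · rw [if_pos (le_of_eq h0), PySem.List.slice_to _ (by omega), h0]
      simp
    · rw [if_neg (by omega), PySem.List.slice_to _ (by omega)]

theorem extract_important_patches_changed : Claim_changed_extract_important_patches := by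
  unfold Claim_changed_extract_important_patches; decide

theorem extract_important_patches_tight : Claim_exact_extract_important_patches := by
  intro pi k _ hD heq
  unfold D_extract_important_patches at hD
  obtain ⟨h1, h2⟩ := hD
  unfold extract_important_patches extract_important_patches_alt pyNlargest at heq
  simp only [PySem.List.length_sorted] at heq
  rw [if_pos (le_of_lt h1)] at heq
  simp only [List.map_nil, List.map_eq_nil_iff] at heq
  exact slice_to_ne_nil _ _ h1 (by rw [PySem.List.length_sorted]; exact h2) heq
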